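-- pv_equiv track=rewrite | github.com/Keketr/OP | project_v5/Project Procees/main.py | detect_best_improvement
-- ===== SOURCE A (Python) =====
-- def detect_best_improvement(marginal_costs, transport_matrix):
--     # Initialize variables to find the maximum negative marginal cost
--     max_negative_cost = 0
--     optimal_row = None
--     optimal_column = None
--
--     # Search through the marginal costs for the best (most negative) improvement opportunity
--     for row_index, row in enumerate(marginal_costs):
--         for col_index, cost in enumerate(row):
--             # Check if the cell in the transport matrix is unutilized and cost is negative
--             if transport_matrix[row_index][col_index] == 0 and cost < max_negative_cost:
--                 max_negative_cost = cost
--                 optimal_row = row_index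
--                 optimal_column = col_index
--
--     # Return the indices of the optimal improvement if a negative cost was found
--     if max_negative_cost < 0:
--         return (optimal_column, optimal_row)
-- ===== SOURCE B (Python) =====
-- def detect_best_improvement(marginal_costs, transport_matrix):
--     # Stage 1: compute the best (minimum) marginal cost over all unused cells.
--     best = min((cost for i, row in enumerate(marginal_costs)
--                      for j, cost in enumerate(row)
--                      if transport_matrix[i][j] == 0), default=0)
--     if best >= 0:
--         return None
--     # Stage 2: locate the first cell that achieves it.
--     for i, row in enumerate(marginal_costs):
--         for j, cost in enumerate(row):
--             if transport_matrix[i][j] == 0 and cost == best: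
--                 return (j, i)
-- ===== Notes on version B (the rewrite author's own statement) =====
-- stated objective: alternative
-- what changed: Replaces A's single running-argmin loop over three mutable sentinel variables by a min-then-locate decomposition: stage 1 reduces the unused cells to the minimum cost value alone (min with default 0), stage 2 is a separate search that returns the first cell achieving that value.
import Mathlib
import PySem

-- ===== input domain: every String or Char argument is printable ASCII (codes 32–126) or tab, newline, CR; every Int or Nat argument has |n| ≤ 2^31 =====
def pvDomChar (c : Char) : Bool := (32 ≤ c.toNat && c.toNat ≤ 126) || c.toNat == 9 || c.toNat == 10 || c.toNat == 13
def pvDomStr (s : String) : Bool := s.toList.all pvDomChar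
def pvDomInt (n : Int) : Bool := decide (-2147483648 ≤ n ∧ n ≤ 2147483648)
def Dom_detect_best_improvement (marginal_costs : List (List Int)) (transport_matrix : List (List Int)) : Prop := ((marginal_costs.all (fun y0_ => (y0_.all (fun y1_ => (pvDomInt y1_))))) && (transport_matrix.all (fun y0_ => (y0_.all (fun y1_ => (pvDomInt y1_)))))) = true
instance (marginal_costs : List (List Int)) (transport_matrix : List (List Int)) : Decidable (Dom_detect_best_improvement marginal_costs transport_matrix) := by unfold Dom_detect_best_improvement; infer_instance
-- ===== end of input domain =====

-- B replaces A's running-argmin loop by a min-then-locate decomposition: first reduce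
-- the unused cells to the minimum cost value, then search for the first cell achieving it.


-- ===== PORT A =====
-- total stand-in for transport_matrix[i][j]; the default 1 is only reached where
-- Python raises IndexError, and Pre_ excludes exactly those inputs
def tmGet (tm : List (List Int)) (i j : Int) : Int :=
  ((PySem.List.pyGet? tm i).bind (fun r => PySem.List.pyGet? r j)).getD 1

def detect_best_improvement (marginal_costs : List (List Int)) (transport_matrix : List (List Int)) : Option (Int × Int) :=
  -- state = (max_negative_cost, optimal_row, optimal_column)
  let s := (PySem.List.enumerate marginal_costs 0).foldl
    (fun s p =>
      (PySem.List.enumerate p.2 0).foldl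
        (fun s q =>
          if tmGet transport_matrix p.1 q.1 = 0 ∧ q.2 < s.1
          then (q.2, some p.1, some q.1) else s) s)
    ((0 : Int), (none : Option Int), (none : Option Int))
  if s.1 < 0 then
    match s.2.2, s.2.1 with
    | some c, some r => some (c, r)
    | _, _ => none
  else none

-- ===== PORT B =====
-- stage 1 of B: minimum marginal cost over unused cells (Python min(gen, default=0))
def pvBest (marginal_costs transport_matrix : List (List Int)) : Int :=
  (PySem.List.min?
    ((PySem.List.enumerate marginal_costs 0).flatMap
      (fun p => (PySem.List.enumerate p.2 0).filterMap
        (fun q => if tmGet transport_matrix p.1 q.1 = 0 then some q.2 else none)))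
    (fun x => x)).getD 0

def detect_best_improvement_alt (marginal_costs : List (List Int)) (transport_matrix : List (List Int)) : Option (Int × Int) :=
  if 0 ≤ pvBest marginal_costs transport_matrix then none
  else
    -- stage 2: first cell achieving the stage-1 minimum
    (PySem.List.enumerate marginal_costs 0).findSome?
      (fun p => (PySem.List.enumerate p.2 0).findSome?
        (fun q => if tmGet transport_matrix p.1 q.1 = 0 ∧ q.2 = pvBest marginal_costs transport_matrix
                  then some (q.1, p.1) else none))

-- ===== PRECONDITION & SPEC =====
-- Pre_ excludes exactly the inputs where indexing transport_matrix[i][j] raises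
-- IndexError in Python (both A and B index it for every cell of a nonempty row).
def Pre_detect_best_improvement (marginal_costs : List (List Int)) (transport_matrix : List (List Int)) : Prop :=
  ∀ i < marginal_costs.length, marginal_costs[i]! ≠ [] →
    (marginal_costs[i]!).length ≤ ((transport_matrix[i]?).map List.length).getD 0
instance (marginal_costs : List (List Int)) (transport_matrix : List (List Int)) : Decidable (Pre_detect_best_improvement marginal_costs transport_matrix) := by unfold Pre_detect_best_improvement; infer_instance

def pvWitness_detect_best_improvement : List (List Int) × List (List Int) :=
  ([[-1, 2], [3, -4]], [[0, 1], [1, 0]])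

def Spec_detect_best_improvement (marginal_costs : List (List Int)) (transport_matrix : List (List Int)) (out : Option (Int × Int)) : Prop := out = detect_best_improvement_alt marginal_costs transport_matrix
instance (marginal_costs : List (List Int)) (transport_matrix : List (List Int)) (out : Option (Int × Int)) : Decidable (Spec_detect_best_improvement marginal_costs transport_matrix out) := by unfold Spec_detect_best_improvement; infer_instance

-- ===== CLAIM (what is proved, stated in full; the proofs are below) =====
def Claim_equal_detect_best_improvement : Prop := ∀ (marginal_costs : List (List Int)) (transport_matrix : List (List Int)), Dom_detect_best_improvement marginal_costs transport_matrix → Pre_detect_best_improvement marginal_costs transport_matrix → Spec_detect_best_improvement marginal_costs transport_matrix (detect_best_improvement marginal_costs transport_matrix)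

-- ===== LEMMAS AND PROOFS =====

-- the candidate a single cell q = (col, cost) of row ri contributes to A's running best
def pvCand (tm : List (List Int)) (ri : Int) (q : Int × Int) : Option (Int × Int × Int) :=
  if tmGet tm ri q.1 = 0 ∧ q.2 < 0 then some (q.2, ri, q.1) else none

-- first-minimum fold step (keeps the first element achieving the minimum cost)
def pvMinStep (acc : Option (Int × Int × Int)) (x : Int × Int × Int) : Option (Int × Int × Int) :=
  match acc with
  | none => some x
  | some m => if x.1 < m.1 then some x else some m

-- encode the fold accumulator as A's three-variable state
def pvEnc : Option (Int × Int × Int) → Int × Option Int × Option Int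
  | none => (0, none, none)
  | some (c, r, j) => (c, some r, some j)

-- invariant: a non-empty accumulator holds a strictly negative cost
def pvOK : Option (Int × Int × Int) → Prop
  | none => True
  | some t => t.1 < 0

-- the list of A's candidates (negative-cost unused cells) in row-major order
def pvL (mc tm : List (List Int)) : List (Int × Int × Int) :=
  (PySem.List.enumerate mc 0).flatMap
    (fun p => (PySem.List.enumerate p.2 0).filterMap (pvCand tm p.1))

-- the list of all unused-cell costs in row-major order (B's stage-1 list)
def pvM (mc tm : List (List Int)) : List Int :=
  (PySem.List.enumerate mc 0).flatMap
    (fun p => (PySem.List.enumerate p.2 0).filterMap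
      (fun q => if tmGet tm p.1 q.1 = 0 then some q.2 else none))

lemma pvOK_minStep {acc : Option (Int × Int × Int)} {x : Int × Int × Int}
    (h : pvOK acc) (hx : x.1 < 0) : pvOK (pvMinStep acc x) := by
  cases acc with
  | none => exact hx
  | some m => simp only [pvMinStep]; split <;> simpa [pvOK] using (by first | exact hx | exact h)

lemma pvCand_neg {tm : List (List Int)} {ri : Int} {q : Int × Int} {x : Int × Int × Int}
    (h : pvCand tm ri q = some x) : x.1 < 0 := by
  unfold pvCand at h
  split at h
  · cases h; simpa using (by omega : q.2 < 0)
  · exact absurd h (by simp)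

lemma step_eq (tm : List (List Int)) (ri : Int) (acc : Option (Int × Int × Int))
    (q : Int × Int) (h : pvOK acc) :
    (if tmGet tm ri q.1 = 0 ∧ q.2 < (pvEnc acc).1 then (q.2, some ri, some q.1) else pvEnc acc)
      = pvEnc (match pvCand tm ri q with | none => acc | some x => pvMinStep acc x) := by
  cases acc with
  | none =>
      simp only [pvEnc, pvCand, pvMinStep]
      split_ifs <;> simp_all
  | some m =>
      obtain ⟨c, r, j⟩ := m
      have hc : c < 0 := h
      by_cases hA : tmGet tm ri q.1 = 0
      · by_cases hq : q.2 < c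
        · have hq0 : q.2 < 0 := by omega
          simp [pvEnc, pvCand, pvMinStep, hA, hq, hq0]
        · by_cases hq0 : q.2 < 0
          · simp [pvEnc, pvCand, pvMinStep, hA, hq, hq0]
          · simp [pvEnc, pvCand, hA, hq, hq0]
      · simp [pvEnc, pvCand, hA]

-- inner loop of A over a list of (col, cost) cells = first-min fold over its candidates
lemma inner_eq (tm : List (List Int)) (ri : Int) (zs : List (Int × Int))
    (acc : Option (Int × Int × Int)) (h : pvOK acc) :
    zs.foldl (fun s q => if tmGet tm ri q.1 = 0 ∧ q.2 < s.1
                         then (q.2, some ri, some q.1) else s) (pvEnc acc)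
      = pvEnc ((zs.filterMap (pvCand tm ri)).foldl pvMinStep acc)
    ∧ pvOK ((zs.filterMap (pvCand tm ri)).foldl pvMinStep acc) := by
  induction zs generalizing acc with
  | nil => exact ⟨rfl, h⟩
  | cons q zs ih =>
      have hstep := step_eq tm ri acc q h
      have hok : pvOK (match pvCand tm ri q with | none => acc | some x => pvMinStep acc x) := by
        cases hc : pvCand tm ri q with
        | none => exact h
        | some x => exact pvOK_minStep h (pvCand_neg hc)
      have := ih _ hok
      constructor
      · simpa [List.foldl_cons, hstep, List.filterMap_cons] using
          (by cases hc : pvCand tm ri q <;> simp [hc] at this ⊢ <;> exact this.1 : _)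
      · cases hc : pvCand tm ri q <;> simp [hc] <;> simp [hc] at this <;> exact this.2

-- outer loop of A over (row_index, row) pairs = first-min fold over the candidate list
lemma outer_eq (tm : List (List Int)) (ps : List (Int × List Int))
    (acc : Option (Int × Int × Int)) (h : pvOK acc) :
    ps.foldl (fun s p => (PySem.List.enumerate p.2 0).foldl
        (fun s q => if tmGet tm p.1 q.1 = 0 ∧ q.2 < s.1
                    then (q.2, some p.1, some q.1) else s) s) (pvEnc acc)
      = pvEnc ((ps.flatMap (fun p => (PySem.List.enumerate p.2 0).filterMap (pvCand tm p.1))).foldl pvMinStep acc)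
    ∧ pvOK ((ps.flatMap (fun p => (PySem.List.enumerate p.2 0).filterMap (pvCand tm p.1))).foldl pvMinStep acc) := by
  induction ps generalizing acc with
  | nil => exact ⟨rfl, h⟩
  | cons p ps ih =>
      have hin := inner_eq tm p.1 (PySem.List.enumerate p.2 0) acc h
      have := ih _ hin.2
      simp only [List.foldl_cons, List.flatMap_cons, List.foldl_append, hin.1]
      exact this

-- the first-min fold never forgets a value
lemma pvMinStep_isSome (L : List (Int × Int × Int)) (m : Int × Int × Int) :
    (L.foldl pvMinStep (some m)).isSome := by
  induction L generalizing m with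
  | nil => rfl
  | cons x L ih =>
      simp only [List.foldl_cons, pvMinStep]
      split <;> exact ih _

lemma pvMinStep_none_nil {L : List (Int × Int × Int)}
    (h : L.foldl pvMinStep none = none) : L = [] := by
  cases L with
  | nil => rfl
  | cons x L =>
      exfalso
      have := pvMinStep_isSome L x
      simp only [List.foldl_cons, pvMinStep] at h
      rw [h] at this
      simp at this

-- characterisation of the first-min fold: result is minimal and is the FIRST minimum
lemma pvMin_spec (L : List (Int × Int × Int)) (m t : Int × Int × Int)
    (h : L.foldl pvMinStep (some m) = some t) :
    t.1 ≤ m.1 ∧ (∀ u ∈ L, t.1 ≤ u.1) ∧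
      (t = m ∨ (t.1 < m.1 ∧ ∃ L1 L2, L = L1 ++ t :: L2 ∧ ∀ u ∈ L1, t.1 < u.1)) := by
  induction L generalizing m with
  | nil =>
      simp only [List.foldl_nil, Option.some.injEq] at h
      subst h
      exact ⟨le_refl _, by simp, Or.inl rfl⟩
  | cons x L ih =>
      simp only [List.foldl_cons, pvMinStep] at h
      by_cases hx : x.1 < m.1
      · rw [if_pos hx] at h
        obtain ⟨h1, h2, h3⟩ := ih x h
        refine ⟨by omega, ?_, ?_⟩
        · intro u hu; rcases List.mem_cons.1 hu with rfl | hu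
          · exact h1
          · exact h2 u hu
        · right
          rcases h3 with rfl | ⟨hlt, L1, L2, rfl, hall⟩
          · exact ⟨hx, [], L, rfl, by simp⟩
          · exact ⟨by omega, x :: L1, L2, rfl, by
              intro u hu; rcases List.mem_cons.1 hu with rfl | hu
              · omega
              · exact hall u hu⟩
      · rw [if_neg hx] at h
        obtain ⟨h1, h2, h3⟩ := ih m h
        refine ⟨h1, ?_, ?_⟩
        · intro u hu; rcases List.mem_cons.1 hu with rfl | hu
          · omega
          · exact h2 u hu
        · rcases h3 with rfl | ⟨hlt, L1, L2, rfl, hall⟩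
          · exact Or.inl rfl
          · exact Or.inr ⟨hlt, x :: L1, L2, rfl, by
              intro u hu; rcases List.mem_cons.1 hu with rfl | hu
              · omega
              · exact hall u hu⟩

lemma pvMin_none_spec (L : List (Int × Int × Int)) (t : Int × Int × Int)
    (h : L.foldl pvMinStep none = some t) :
    (∀ u ∈ L, t.1 ≤ u.1) ∧ ∃ L1 L2, L = L1 ++ t :: L2 ∧ ∀ u ∈ L1, t.1 < u.1 := by
  cases L with
  | nil => simp at h
  | cons x L =>
      simp only [List.foldl_cons, pvMinStep] at h
      obtain ⟨h1, h2, h3⟩ := pvMin_spec L x t h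
      refine ⟨?_, ?_⟩
      · intro u hu; rcases List.mem_cons.1 hu with rfl | hu
        · exact h1
        · exact h2 u hu
      · rcases h3 with rfl | ⟨hlt, L1, L2, rfl, hall⟩
        · exact ⟨[], L, rfl, by simp⟩
        · exact ⟨x :: L1, L2, rfl, by
            intro u hu; rcases List.mem_cons.1 hu with rfl | hu
            · omega
            · exact hall u hu⟩

-- membership transfer between the candidate list and the unused-cost list
lemma mem_M_of_mem_L {mc tm : List (List Int)} {t : Int × Int × Int}
    (h : t ∈ pvL mc tm) : t.1 ∈ pvM mc tm ∧ t.1 < 0 := by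
  unfold pvL at h
  unfold pvM
  rw [List.mem_flatMap] at h
  obtain ⟨p, hp, ht⟩ := h
  rw [List.mem_filterMap] at ht
  obtain ⟨q, hq, hcand⟩ := ht
  unfold pvCand at hcand
  split at hcand
  · rename_i hcond
    cases hcand
    refine ⟨?_, hcond.2⟩
    rw [List.mem_flatMap]
    exact ⟨p, hp, by rw [List.mem_filterMap]; exact ⟨q, hq, by simp [hcond.1]⟩⟩
  · exact absurd hcand (by simp)

lemma exists_L_of_mem_M_neg {mc tm : List (List Int)} {v : Int}
    (h : v ∈ pvM mc tm) (hv : v < 0) : ∃ t ∈ pvL mc tm, t.1 = v := by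
  unfold pvM at h
  rw [List.mem_flatMap] at h
  obtain ⟨p, hp, hv'⟩ := h
  rw [List.mem_filterMap] at hv'
  obtain ⟨q, hq, hcond⟩ := hv'
  split at hcond
  · rename_i h0
    cases hcond
    refine ⟨(q.2, p.1, q.1), ?_, rfl⟩
    unfold pvL
    rw [List.mem_flatMap]
    exact ⟨p, hp, by
      rw [List.mem_filterMap]
      exact ⟨q, hq, by simp [pvCand, h0, hv]⟩⟩
  · exact absurd hcond (by simp)

-- B's stage-1 value, phrased over pvM
lemma pvBest_eq (mc tm : List (List Int)) :
    pvBest mc tm = (PySem.List.min? (pvM mc tm) (fun x => x)).getD 0 := rfl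

-- B's stage-2 search, per row: findSome? = find? over the row's candidates (for b < 0)
lemma loc_inner (tm : List (List Int)) (ri b : Int) (hb : b < 0) (zs : List (Int × Int)) :
    zs.findSome? (fun q => if tmGet tm ri q.1 = 0 ∧ q.2 = b then some (q.1, ri) else none)
      = ((zs.filterMap (pvCand tm ri)).find? (fun u => u.1 == b)).map (fun u => (u.2.2, u.2.1)) := by
  induction zs with
  | nil => rfl
  | cons q zs ih =>
      rw [List.findSome?_cons, List.filterMap_cons]
      by_cases h0 : tmGet tm ri q.1 = 0
      · by_cases heq : q.2 = b
        · have hneg : q.2 < 0 := by omega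
          have hcand : pvCand tm ri q = some (q.2, ri, q.1) := by simp [pvCand, h0, hneg]
          simp only [hcand, if_pos (show tmGet tm ri q.1 = 0 ∧ q.2 = b from ⟨h0, heq⟩)]
          rw [List.find?_cons_of_pos (by simpa using heq)]
          simp
        · by_cases hneg : q.2 < 0
          · have hcand : pvCand tm ri q = some (q.2, ri, q.1) := by simp [pvCand, h0, hneg]
            simp only [hcand, if_neg (show ¬ (tmGet tm ri q.1 = 0 ∧ q.2 = b) from fun hc => heq hc.2)]
            rw [List.find?_cons_of_neg (by simpa using heq)]
            exact ih
          · have hcand : pvCand tm ri q = none := by simp [pvCand, hneg]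
            simp only [hcand, if_neg (show ¬ (tmGet tm ri q.1 = 0 ∧ q.2 = b) from fun hc => by omega)]
            exact ih
      · have hcand : pvCand tm ri q = none := by simp [pvCand, h0]
        simp only [hcand, if_neg (show ¬ (tmGet tm ri q.1 = 0 ∧ q.2 = b) from fun hc => h0 hc.1)]
        exact ih

-- B's stage-2 search = find? over the full candidate list (for b < 0)
lemma loc_outer (tm : List (List Int)) (b : Int) (hb : b < 0) (ps : List (Int × List Int)) :
    ps.findSome? (fun p => (PySem.List.enumerate p.2 0).findSome?
        (fun q => if tmGet tm p.1 q.1 = 0 ∧ q.2 = b then some (q.1, p.1) else none))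
      = ((ps.flatMap (fun p => (PySem.List.enumerate p.2 0).filterMap (pvCand tm p.1))).find?
          (fun u => u.1 == b)).map (fun u => (u.2.2, u.2.1)) := by
  induction ps with
  | nil => rfl
  | cons p ps ih =>
      rw [List.findSome?_cons, List.flatMap_cons, List.find?_append,
        loc_inner tm p.1 b hb (PySem.List.enumerate p.2 0)]
      cases hfind : ((PySem.List.enumerate p.2 0).filterMap (pvCand tm p.1)).find? (fun u => u.1 == b) with
      | none => simp [ih]
      | some u => simp

-- find? picks t out of the decomposition produced by the first-min fold
lemma find?_first {L1 L2 : List (Int × Int × Int)} {t : Int × Int × Int}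
    (hall : ∀ u ∈ L1, t.1 < u.1) :
    (L1 ++ t :: L2).find? (fun u => u.1 == t.1) = some t := by
  rw [List.find?_append]
  have h1 : L1.find? (fun u => u.1 == t.1) = none := by
    rw [List.find?_eq_none]
    intro u hu
    have := hall u hu
    simpa using (by omega : ¬ u.1 = t.1)
  simp [h1]

-- ===== VERDICT (by name: the statement is the Claim_ definition above) =====
theorem detect_best_improvement_spec : Claim_equal_detect_best_improvement := by
  intro mc tm _ _
  show detect_best_improvement mc tm = detect_best_improvement_alt mc tm
  have hA := outer_eq tm (PySem.List.enumerate mc 0) none trivial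
  have hL : ((PySem.List.enumerate mc 0).flatMap
      (fun p => (PySem.List.enumerate p.2 0).filterMap (pvCand tm p.1))) = pvL mc tm := rfl
  rw [hL] at hA
  simp only [detect_best_improvement, detect_best_improvement_alt]
  have henc : ((0 : Int), (none : Option Int), (none : Option Int)) = pvEnc none := rfl
  rw [henc, hA.1]
  cases hF : (pvL mc tm).foldl pvMinStep none with
  | none =>
      have hnil : pvL mc tm = [] := pvMinStep_none_nil hF
      have hM : ∀ v ∈ pvM mc tm, 0 ≤ v := by
        intro v hv
        by_contra hneg
        obtain ⟨u, hu, _⟩ := exists_L_of_mem_M_neg hv (by omega)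
        rw [hnil] at hu
        exact absurd hu (by simp)
      have hbest : 0 ≤ pvBest mc tm := by
        rw [pvBest_eq]
        cases hmin : PySem.List.min? (pvM mc tm) (fun x => x) with
        | none => simp
        | some v => simpa using hM v (PySem.List.min?_mem hmin)
      rw [if_pos hbest]
      simp [pvEnc]
  | some t =>
      obtain ⟨hmin, L1, L2, hdec, hall⟩ := pvMin_none_spec _ _ hF
      have htneg : t.1 < 0 := by
        have := hA.2
        rw [hF] at this
        exact this
      have htL : t ∈ pvL mc tm := by rw [hdec]; simp
      obtain ⟨htM, _⟩ := mem_M_of_mem_L htL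
      have hbest : pvBest mc tm = t.1 := by
        rw [pvBest_eq]
        cases hmin' : PySem.List.min? (pvM mc tm) (fun x => x) with
        | none =>
            exfalso
            rw [PySem.List.min?_eq_none_iff] at hmin'
            rw [hmin'] at htM
            exact absurd htM (by simp)
        | some v =>
            have hle : v ≤ t.1 := PySem.List.min?_isMin hmin' t.1 htM
            have hge : t.1 ≤ v := by
              have hvM : v ∈ pvM mc tm := PySem.List.min?_mem hmin'
              by_cases hv : v < 0
              · obtain ⟨u, hu, hu1⟩ := exists_L_of_mem_M_neg hvM hv
                have := hmin u hu
                omega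
              · omega
            simp
            omega
      rw [hbest, if_neg (show ¬ (0 : Int) ≤ t.1 by omega),
        loc_outer tm t.1 htneg, hL, hdec, find?_first hall]
      simp [pvEnc, htneg]
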